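-- pv_equiv track=rewrite | github.com/CJary/Projects | RPI Projects/CS1100/hw4/hw4_part1.py | punt
-- ===== SOURCE A (Python) =====
-- def punt(passw):
--     pun1 = 0
--     pun2 = 0
--     for punctuation in passw:
--         if punctuation == '!' or punctuation == '@' or punctuation == '#' or punctuation == '$':
--             pun1 =1
--         elif punctuation == '%' or punctuation == '^' or punctuation == '&' or punctuation == '*':
--             pun2 =1
--     return (pun1,pun2)
-- ===== SOURCE B (Python) =====
-- def punt(passw):
--     pun1 = int(any(ch in passw for ch in '!@#$'))
--     pun2 = int(any(ch in passw for ch in '%^&*'))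
--     return (pun1, pun2)
-- ===== Notes on version B (the rewrite author's own statement) =====
-- stated objective: simpler
-- what changed: Reverses the traversal: instead of one pass over the password classifying each character into two flag assignments, B iterates over the eight fixed group characters and searches the password for each with a short-circuiting any(ch in passw), converting to int.
import Mathlib
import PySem

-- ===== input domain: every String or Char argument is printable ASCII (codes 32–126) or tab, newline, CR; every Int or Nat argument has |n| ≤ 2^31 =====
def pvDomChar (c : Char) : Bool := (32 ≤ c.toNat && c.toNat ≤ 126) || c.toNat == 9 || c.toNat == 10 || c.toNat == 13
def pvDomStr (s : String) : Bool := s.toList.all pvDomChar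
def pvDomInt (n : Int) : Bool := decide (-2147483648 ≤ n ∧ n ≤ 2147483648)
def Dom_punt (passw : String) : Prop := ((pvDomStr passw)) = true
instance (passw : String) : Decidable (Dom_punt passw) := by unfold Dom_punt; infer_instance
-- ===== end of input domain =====

-- B reverses the traversal: it iterates over the eight fixed group characters and
-- searches the password for each (short-circuiting), instead of A's single pass over
-- the password with per-character flag assignment (objective: simpler).


-- ===== PORT A =====
-- A's loop body, named so the proof can talk about it
def puntStep : Int × Int → Char → Int × Int := fun st punctuation =>
  if punctuation = '!' ∨ punctuation = '@' ∨ punctuation = '#' ∨ punctuation = '$' then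
    (1, st.2)
  else if punctuation = '%' ∨ punctuation = '^' ∨ punctuation = '&' ∨ punctuation = '*' then
    (st.1, 1)
  else st

-- for punctuation in passw: if … pun1 = 1 elif … pun2 = 1
def punt (passw : String) : Int × Int :=
  let st := passw.toList.foldl puntStep (0, 0)
  (st.1, st.2)

-- ===== PORT B =====
-- int(any(ch in passw for ch in group)): scan the group chars, searching passw for each
def punt_alt (passw : String) : Int × Int :=
  let pun1 : Int := if ['!','@','#','$'].any (fun ch => passw.toList.contains ch) then 1 else 0
  let pun2 : Int := if ['%','^','&','*'].any (fun ch => passw.toList.contains ch) then 1 else 0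
  (pun1, pun2)

-- ===== PRECONDITION & SPEC =====
def Spec_punt (passw : String) (out : Int × Int) : Prop := out = punt_alt passw
instance (passw : String) (out : Int × Int) : Decidable (Spec_punt passw out) := by unfold Spec_punt; infer_instance

-- ===== CLAIM (what is proved, stated in full; the proofs are below) =====
def Claim_equal_punt : Prop := ∀ (passw : String), Dom_punt passw → Spec_punt passw (punt passw)

-- ===== LEMMAS AND PROOFS =====

theorem puntFoldl (l : List Char) (a b : Int) :
    l.foldl puntStep (a, b) =
      ((if ∃ c ∈ l, c ∈ ['!','@','#','$'] then 1 else a),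
       (if ∃ c ∈ l, c ∈ ['%','^','&','*'] then 1 else b)) := by
  induction l generalizing a b with
  | nil => simp
  | cons x xs ih =>
    rw [List.foldl_cons]
    by_cases m1 : x = '!' ∨ x = '@' ∨ x = '#' ∨ x = '$'
    · have hs : puntStep (a, b) x = (1, b) := by simp [puntStep, m1]
      have nm2 : ¬(x = '%' ∨ x = '^' ∨ x = '&' ∨ x = '*') := by
        rcases m1 with h|h|h|h <;> subst h <;> decide
      rw [hs, ih, if_pos (⟨x, by simp, by simpa using m1⟩ : ∃ c ∈ x :: xs, c ∈ ['!','@','#','$'])]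
      simp [nm2]
    · by_cases m2 : x = '%' ∨ x = '^' ∨ x = '&' ∨ x = '*'
      · have hs : puntStep (a, b) x = (a, 1) := by simp [puntStep, m1, m2]
        rw [hs, ih, if_pos (⟨x, by simp, by simpa using m2⟩ : ∃ c ∈ x :: xs, c ∈ ['%','^','&','*'])]
        simp [m1]
      · have hs : puntStep (a, b) x = (a, b) := by simp [puntStep, m1, m2]
        rw [hs, ih]
        simp [m1, m2]

theorem any_contains_iff (g l : List Char) :
    (g.any (fun ch => l.contains ch)) = true ↔ ∃ c ∈ l, c ∈ g := by
  simp [List.any_eq_true]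
  exact ⟨fun ⟨c, hg, hl⟩ => ⟨c, hl, hg⟩, fun ⟨c, hl, hg⟩ => ⟨c, hg, hl⟩⟩

-- ===== VERDICT (by name: the statement is the Claim_ definition above) =====
theorem punt_spec : Claim_equal_punt := by
  intro passw _
  unfold Spec_punt punt punt_alt
  rw [puntFoldl]
  have key : ∀ (g : List Char),
      (if (g.any (fun ch => passw.toList.contains ch)) then (1:Int) else 0)
        = if ∃ c ∈ passw.toList, c ∈ g then 1 else 0 := by
    intro g
    by_cases h : ∃ c ∈ passw.toList, c ∈ g
    · rw [if_pos ((any_contains_iff g _).2 h), if_pos h]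
    · rw [if_neg (fun hb => h ((any_contains_iff g _).1 hb)), if_neg h]
  rw [key, key]
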